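-- pv_equiv track=rewrite | github.com/sannidhi29/personalized-hypnogram | sleep_model.py | generate_sleep_cycles
-- ===== SOURCE A (Python) =====
-- def generate_sleep_cycles(total_minutes):
--     stages = []
--     minutes_used = 0
--     cycle_number = 1
--
--     while minutes_used < total_minutes:
--         if cycle_number <= 2:
--             cycle = ["N1", "N2", "N3", "N3", "N2", "REM"]
--         elif cycle_number <= 4:
--             cycle = ["N1", "N2", "N2", "N3", "N2", "REM"]
--         else:
--             cycle = ["N1", "N2", "N2", "REM", "REM", "REM"]
--
--         for stage in cycle:
--             if minutes_used >= total_minutes: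
--                 break
--
--             stages.append(stage)
--             minutes_used = minutes_used + 15
--
--         cycle_number = cycle_number + 1
--
--     return stages
-- ===== SOURCE B (Python) =====
-- def generate_sleep_cycles(total_minutes):
--     n = max(0, -(-total_minutes // 15))  # number of 15-minute blocks, ceiling division
--     stages = []
--     for i in range(n):
--         cycle_number = i // 6 + 1
--         if cycle_number <= 2:
--             cycle = ["N1", "N2", "N3", "N3", "N2", "REM"]
--         elif cycle_number <= 4:
--             cycle = ["N1", "N2", "N2", "N3", "N2", "REM"]
--         else:
--             cycle = ["N1", "N2", "N2", "REM", "REM", "REM"]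
--         stages.append(cycle[i % 6])
--     return stages
-- ===== Notes on version B (the rewrite author's own statement) =====
-- stated objective: alternative
-- what changed: Replaces A's while-loop with a running minutes_used accumulator and an inner for with break by computing the block count n = ceil(total/15) up front and mapping each index i directly to its stage via i//6+1 and i%6.
import Mathlib
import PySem

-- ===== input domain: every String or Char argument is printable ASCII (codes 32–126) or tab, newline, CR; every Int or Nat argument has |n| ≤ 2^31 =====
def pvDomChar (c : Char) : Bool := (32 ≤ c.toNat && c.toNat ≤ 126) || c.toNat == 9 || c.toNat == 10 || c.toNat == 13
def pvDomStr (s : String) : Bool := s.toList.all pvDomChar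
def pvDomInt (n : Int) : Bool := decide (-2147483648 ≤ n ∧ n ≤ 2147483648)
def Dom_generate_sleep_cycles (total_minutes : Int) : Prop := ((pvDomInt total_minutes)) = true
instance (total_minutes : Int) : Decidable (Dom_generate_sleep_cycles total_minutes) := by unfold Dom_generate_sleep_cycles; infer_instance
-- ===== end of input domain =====

-- B replaces A's while-loop with a running minutes_used accumulator and inner for-with-break
-- by computing the block count n = ceil(total/15) up front and mapping each index i directly
-- to its stage via i//6+1 and i%6 (objective: alternative decomposition, same O(n) cost).

-- ===== PORT A =====
-- the three cycle tables selected by cycle_number (shared data table of both Pythons)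
def pyCycle (c : Int) : List String :=
  if c ≤ 2 then ["N1", "N2", "N3", "N3", "N2", "REM"]
  else if c ≤ 4 then ["N1", "N2", "N2", "N3", "N2", "REM"]
  else ["N1", "N2", "N2", "REM", "REM", "REM"]

lemma pyCycle_ne_nil (c : Int) : pyCycle c ≠ [] := by
  unfold pyCycle; split_ifs <;> simp

-- A's inner 'for stage in cycle' with its break: returns (stages, minutes_used) after the loop
def aInner (total : Int) (stages : List String) (mu : Int) : List String → List String × Int
  | [] => (stages, mu)
  | s :: rest =>
      if total ≤ mu then (stages, mu)
      else aInner total (stages ++ [s]) (mu + 15) rest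

lemma aInner_snd_mono (l : List String) : ∀ (total : Int) (st : List String) (mu : Int),
    mu ≤ (aInner total st mu l).2 := by
  induction l with
  | nil => intro total st mu; simp [aInner]
  | cons s rest ih =>
      intro total st mu
      simp only [aInner]
      split
      · simp
      · have := ih total (st ++ [s]) (mu + 15); omega

lemma aInner_snd_progress (total : Int) (st : List String) (mu : Int) (l : List String)
    (h : mu < total) (hl : l ≠ []) : mu + 15 ≤ (aInner total st mu l).2 := by
  cases l with
  | nil => exact absurd rfl hl
  | cons s rest =>
      simp only [aInner, if_neg (by omega : ¬ total ≤ mu)]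
      exact aInner_snd_mono rest total (st ++ [s]) (mu + 15)

-- A's outer while-loop
def aLoop (total mu cn : Int) (stages : List String) : List String :=
  if h : mu < total then
    let cycle := pyCycle cn
    let r := aInner total stages mu cycle
    aLoop total r.2 (cn + 1) r.1
  else stages
termination_by (total - mu).toNat
decreasing_by
  have := aInner_snd_progress total stages mu (pyCycle cn) h (pyCycle_ne_nil cn)
  omega

def generate_sleep_cycles (total_minutes : Int) : List String :=
  aLoop total_minutes 0 1 []

-- ===== PORT B =====
def generate_sleep_cycles_alt (total_minutes : Int) : List String :=
  let n : Int := max 0 (-(PySem.Int.floordiv (-total_minutes) 15))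
  (PySem.List.pyRange 0 n 1).map (fun i =>
    let cycle_number := PySem.Int.floordiv i 6 + 1
    let cycle := pyCycle cycle_number
    -- cycle[i % 6]: i % 6 ∈ [0,6) so Python indexing is exact; toNat is safe (nonneg)
    cycle.getD (PySem.Int.mod i 6).toNat "")

-- ===== PRECONDITION & SPEC =====
def Spec_generate_sleep_cycles (total_minutes : Int) (out : List String) : Prop := out = generate_sleep_cycles_alt total_minutes
instance (total_minutes : Int) (out : List String) : Decidable (Spec_generate_sleep_cycles total_minutes out) := by unfold Spec_generate_sleep_cycles; infer_instance

-- ===== CLAIM (what is proved, stated in full; the proofs are below) =====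
def Claim_equal_generate_sleep_cycles : Prop := ∀ (total_minutes : Int), Dom_generate_sleep_cycles total_minutes → Spec_generate_sleep_cycles total_minutes (generate_sleep_cycles total_minutes)

-- ===== LEMMAS AND PROOFS =====

-- number of 15-minute blocks, and the stage at block index k
def pvN (t : Int) : Nat := (max 0 (-(PySem.Int.floordiv (-t) 15))).toNat

def pvG (k : Nat) : String := (pyCycle ((k / 6 : Nat) + 1)).getD (k % 6) ""

lemma lt_iff_pvN (t : Int) (k : Nat) : 15 * (k : Int) < t ↔ k < pvN t := by
  unfold pvN
  rw [show PySem.Int.floordiv (-t) 15 = (-t) / 15 from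
    PySem.Int.floordiv_eq_ediv_of_pos (by omega)]
  omega

lemma pyCycle_length (c : Int) : (pyCycle c).length = 6 := by
  unfold pyCycle; split_ifs <;> rfl

lemma aInner_eq (t : Int) : ∀ (l st : List String) (k : Nat),
    aInner t st (15 * (k : Int)) l
      = (st ++ l.take (pvN t - k), 15 * ((k + min l.length (pvN t - k) : Nat) : Int)) := by
  intro l
  induction l with
  | nil => intro st k; simp [aInner]
  | cons s rest ih =>
      intro st k
      by_cases hk : k < pvN t
      · have hlt : 15 * (k : Int) < t := (lt_iff_pvN t k).mpr hk
        obtain ⟨d, hd⟩ : ∃ d, pvN t - k = d + 1 := ⟨pvN t - k - 1, by omega⟩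
        have h15 : 15 * (k : Int) + 15 = 15 * ((k + 1 : Nat) : Int) := by push_cast; ring
        simp only [aInner, if_neg (by omega : ¬ t ≤ 15 * (k : Int)), h15, ih (st ++ [s]) (k + 1)]
        have hd' : pvN t - (k + 1) = d := by omega
        rw [hd, hd', List.take_succ_cons]
        simp only [Prod.mk.injEq, List.length_cons]
        refine ⟨by simp, ?_⟩
        push_cast
        omega
      · have : ¬ 15 * (k : Int) < t := fun h => hk ((lt_iff_pvN t k).mp h)
        have h0 : pvN t - k = 0 := by omega
        simp [aInner, h0, if_pos (by omega : t ≤ 15 * (k : Int))]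

lemma pvG_val (m j : Nat) (h : j < 6) :
    pvG (6 * m + j) = (pyCycle ((m : Int) + 1)).getD j "" := by
  unfold pvG
  have h1 : (6 * m + j) / 6 = m := by omega
  have h2 : (6 * m + j) % 6 = j := by omega
  rw [h1, h2]

lemma take_eq_map_range (l : List String) (L : Nat) (hL : L ≤ l.length) :
    (List.range L).map (fun j => l.getD j "") = l.take L := by
  apply List.ext_getElem
  · simp [hL]
  · intro i h1 h2
    simp only [List.getElem_map, List.getElem_range, List.getElem_take]
    rw [List.getD_eq_getElem l "" (by simp at h1 ⊢; omega)]

lemma cycle_take (m L : Nat) (hL : L ≤ 6) :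
    (List.range' (6 * m) L).map pvG = (pyCycle ((m : Int) + 1)).take L := by
  rw [List.range'_eq_map_range, List.map_map]
  rw [← take_eq_map_range _ L (by rw [pyCycle_length]; exact hL)]
  apply List.map_congr_left
  intro j hj
  have hj6 : j < 6 := by simp at hj; omega
  simp only [Function.comp_apply]
  exact pvG_val m j hj6

lemma aLoop_eq (t : Int) : ∀ (d : Nat), ∀ (m : Nat) (st : List String), pvN t - 6 * m = d →
    aLoop t (15 * ((6 * m : Nat) : Int)) ((m : Int) + 1) st
      = st ++ (List.range' (6 * m) d).map pvG := by
  intro d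
  induction d using Nat.strongRecOn with
  | ind d IH =>
    intro m st hd
    rw [aLoop]
    by_cases hc : 15 * ((6 * m : Nat) : Int) < t
    · have hm : 6 * m < pvN t := (lt_iff_pvN t (6 * m)).mp hc
      rw [dif_pos hc]
      simp only [aInner_eq t (pyCycle ((m : Int) + 1)) st (6 * m), pyCycle_length]
      by_cases hge : 6 ≤ pvN t - 6 * m
      · -- full cycle consumed, recurse
        have hmin : min 6 (pvN t - 6 * m) = 6 := by omega
        have htake : (pyCycle ((m : Int) + 1)).take (pvN t - 6 * m)
            = pyCycle ((m : Int) + 1) :=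
          List.take_of_length_le (by rw [pyCycle_length]; omega)
        have hmu : ((6 * m + 6 : Nat) : Int) = ((6 * (m + 1) : Nat) : Int) :=
          congrArg _ (by omega)
        have hcn : ((m : Int) + 1) + 1 = ((m + 1 : Nat) : Int) + 1 := by push_cast; ring
        obtain ⟨e, he⟩ : ∃ e, d = 6 + e := ⟨d - 6, by omega⟩
        subst he
        rw [hmin, htake, hmu, hcn, IH e (by omega) (m + 1) _ (by omega)]
        have hcm : (List.range' (6 * m) 6).map pvG = pyCycle ((m : Int) + 1) := by
          rw [cycle_take m 6 le_rfl, List.take_of_length_le (by simp [pyCycle_length])]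
        have hsplit : List.range' (6 * m) (6 + e) = List.range' (6 * m) 6 ++ List.range' (6 * m + 6) e := by
          simp
        rw [hsplit, List.map_append, hcm, show 6 * m + 6 = 6 * (m + 1) from by omega,
          ← List.append_assoc]
      · -- partial last cycle, then the loop stops
        have hL : pvN t - 6 * m = d := hd
        have hdlt : d < 6 := by omega
        have hmin : min 6 (pvN t - 6 * m) = d := by omega
        have hmu : ((6 * m + min 6 (pvN t - 6 * m) : Nat) : Int) = ((pvN t : Nat) : Int) := by
          rw [hmin]; congr 1; omega
        rw [hmu, aLoop, dif_neg (by
          intro hcon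
          exact absurd ((lt_iff_pvN t (pvN t)).mp hcon) (lt_irrefl _))]
        rw [hL, cycle_take m d (by omega)]
    · rw [dif_neg hc]
      have : ¬ 6 * m < pvN t := fun h => hc ((lt_iff_pvN t (6 * m)).mpr h)
      have hd0 : d = 0 := by omega
      simp [hd0]

lemma alt_eq (t : Int) : generate_sleep_cycles_alt t = (List.range (pvN t)).map pvG := by
  simp only [generate_sleep_cycles_alt]
  rw [PySem.List.pyRange_one, List.map_map]
  have hn : (max 0 (-(PySem.Int.floordiv (-t) 15)) - 0).toNat = pvN t := by
    unfold pvN; omega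
  rw [hn]
  apply List.map_congr_left
  intro k hk
  simp only [Function.comp_apply, zero_add]
  unfold pvG
  have hdiv : PySem.Int.floordiv (k : Int) 6 = ((k / 6 : Nat) : Int) := by
    exact_mod_cast PySem.Int.floordiv_natCast k 6
  have hmod : PySem.Int.mod (k : Int) 6 = ((k % 6 : Nat) : Int) := by
    exact_mod_cast PySem.Int.mod_natCast k 6
  rw [hdiv, hmod, Int.toNat_natCast]

-- ===== VERDICT (by name: the statement is the Claim_ definition above) =====
theorem generate_sleep_cycles_spec : Claim_equal_generate_sleep_cycles := by
  intro t _
  unfold Spec_generate_sleep_cycles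
  have h0 : generate_sleep_cycles t
      = aLoop t (15 * ((6 * 0 : Nat) : Int)) (((0 : Nat) : Int) + 1) [] := by
    unfold generate_sleep_cycles; norm_num
  rw [h0, aLoop_eq t (pvN t) 0 [] (by omega), alt_eq]
  simp [List.range_eq_range']
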